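-- pv_equiv track=rewrite | github.com/nmyinger/slots-retention | slot_game_logic.py | evaluate_lines
-- ===== SOURCE A (Python) =====
-- paylines = [
--     [0, 0, 0, 0, 0],
--     [1, 1, 1, 1, 1],
--     [2, 2, 2, 2, 2],
--     [0, 1, 2, 1, 0],
--     [2, 1, 0, 1, 2],
--     [0, 0, 1, 2, 2],
--     [2, 2, 1, 0, 0],
--     [0, 1, 1, 1, 0],
--     [2, 1, 1, 1, 2],
--     [1, 0, 0, 0, 1]
-- ]
--
-- paytable = {
--     "J": {3: 5, 4: 10, 5: 20},
--     "Q": {3: 5, 4: 10, 5: 20},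
--     "K": {3: 10, 4: 25, 5: 50},
--     "A": {3: 10, 4: 25, 5: 50},
--     "7": {3: 30, 4: 100, 5: 200},
--     "BAR": {3: 20, 4: 150, 5: 400},
--     "W": {3: 50, 4: 300, 5: 600}
-- }
--
-- def evaluate_lines(outcome):
--     total_win = 0
--     wins_detail = []
--     for li, pattern in enumerate(paylines, start=1):
--         line_symbols = [outcome[row][ri] for ri, row in enumerate(pattern)]
--         first_sym = line_symbols[0]
--         if first_sym in ("-", "⭐"):
--             continue
--         base_symbol, count = None, 0
--         best_pay, best_symbol = 0, None
--
--         if first_sym == "W":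
--             wild_count = 1
--             for s in line_symbols[1:]:
--                 if s == "W":
--                     wild_count += 1
--                 else:
--                     break
--             if wild_count >= 3 and wild_count in paytable["W"]:
--                 best_pay = paytable["W"][wild_count]
--                 best_symbol = "W"
--
--         for sym in line_symbols:
--             if sym in ("-", "⭐"):
--                 break
--             if sym == "W" and base_symbol is None:
--                 continue
--             if base_symbol is None:
--                 base_symbol, count = sym, 1
--             elif sym == base_symbol or sym == "W":
--                 count += 1
--             else:
--                 break
--
--         if base_symbol:
--             leading_wilds = 0
--             for sym in line_symbols:
--                 if sym == "W":
--                     leading_wilds += 1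
--                 elif sym in ("-", "⭐"):
--                     leading_wilds = 0
--                     break
--                 else:
--                     break
--             count += leading_wilds
--             if count >= 3 and count in paytable.get(base_symbol, {}):
--                 pay = paytable[base_symbol][count]
--                 if pay > best_pay:
--                     best_pay = pay
--                     best_symbol = base_symbol
--
--         if best_pay > 0:
--             total_win += best_pay
--             wins_detail.append((li, best_symbol, count, best_pay))
--     return total_win, wins_detail
-- ===== SOURCE B (Python) =====
-- paylines = [
--     [0, 0, 0, 0, 0],
--     [1, 1, 1, 1, 1],
--     [2, 2, 2, 2, 2],
--     [0, 1, 2, 1, 0],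
--     [2, 1, 0, 1, 2],
--     [0, 0, 1, 2, 2],
--     [2, 2, 1, 0, 0],
--     [0, 1, 1, 1, 0],
--     [2, 1, 1, 1, 2],
--     [1, 0, 0, 0, 1]
-- ]
--
-- paytable = {
--     "J": {3: 5, 4: 10, 5: 20},
--     "Q": {3: 5, 4: 10, 5: 20},
--     "K": {3: 10, 4: 25, 5: 50},
--     "A": {3: 10, 4: 25, 5: 50},
--     "7": {3: 30, 4: 100, 5: 200},
--     "BAR": {3: 20, 4: 150, 5: 400},
--     "W": {3: 50, 4: 300, 5: 600}
-- }
--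
-- def evaluate_lines(outcome):
--     total, detail = 0, []
--     for li, pattern in enumerate(paylines, start=1):
--         syms = [outcome[row][ri] for ri, row in enumerate(pattern)]
--         if syms[0] in ("-", "⭐"):
--             continue
--         n = len(syms)
--         # one index pass: leading wild run, then the base-symbol run
--         i = 0
--         while i < n and syms[i] == "W":
--             i += 1
--         wild_run = i
--         base, count = None, 0
--         if i < n and syms[i] not in ("-", "⭐"):
--             base, count = syms[i], 1
--             i += 1
--             while i < n and (syms[i] == base or syms[i] == "W"):
--                 count += 1
--                 i += 1
--         best_pay, best_sym = 0, None
--         if wild_run >= 3: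
--             best_pay, best_sym = paytable["W"][wild_run], "W"
--         if base:  # non-empty base symbol, like A's truthiness test
--             count += wild_run
--             pay = paytable.get(base, {}).get(count, 0) if count >= 3 else 0
--             if pay > best_pay:
--                 best_pay, best_sym = pay, base
--         if best_pay > 0:
--             total += best_pay
--             detail.append((li, best_sym, count, best_pay))
--     return total, detail
-- ===== Notes on version B (the rewrite author's own statement) =====
-- stated objective: simpler
-- what changed: A scans each payline up to four times (a wild-count loop, a base-symbol loop with continue/break, and a third re-scan for leading wilds); B makes one left-to-right index pass per line that reads off the leading wild run and then the base-symbol run, and decides the payout from those two numbers.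
import Mathlib
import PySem

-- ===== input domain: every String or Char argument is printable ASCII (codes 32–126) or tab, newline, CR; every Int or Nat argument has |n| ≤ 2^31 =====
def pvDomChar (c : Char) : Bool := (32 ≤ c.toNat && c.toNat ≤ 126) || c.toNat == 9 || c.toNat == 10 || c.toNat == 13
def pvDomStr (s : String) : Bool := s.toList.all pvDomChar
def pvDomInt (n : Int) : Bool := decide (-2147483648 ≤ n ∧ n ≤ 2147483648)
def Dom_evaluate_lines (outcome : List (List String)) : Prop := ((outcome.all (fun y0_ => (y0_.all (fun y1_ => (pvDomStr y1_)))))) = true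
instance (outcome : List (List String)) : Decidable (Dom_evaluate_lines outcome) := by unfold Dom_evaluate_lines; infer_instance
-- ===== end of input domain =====

-- B replaces A's four separate scans of each payline (wild loop, base loop with
-- skip/continue, a re-scan for leading wilds) by one left-to-right index pass that
-- records the leading wild run and then the base-symbol run; same return value.

-- ===== PORT A =====

-- the module constant `paytable` as a lookup: pvPay? sym n = paytable.get(sym,{}).get(n)
def pvPay? (sym : String) (n : Int) : Option Int :=
  let sub : List (Int × Int) :=
    if sym = "J" ∨ sym = "Q" then [(3, 5), (4, 10), (5, 20)]
    else if sym = "K" ∨ sym = "A" then [(3, 10), (4, 25), (5, 50)]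
    else if sym = "7" then [(3, 30), (4, 100), (5, 200)]
    else if sym = "BAR" then [(3, 20), (4, 150), (5, 400)]
    else if sym = "W" then [(3, 50), (4, 300), (5, 600)]
    else []
  sub.lookup n

-- `enumerate(paylines, start=1)` of the module constant `paylines`
def pvEnumPaylines : List (Int × List Int) :=
  [(1, [0, 0, 0, 0, 0]), (2, [1, 1, 1, 1, 1]), (3, [2, 2, 2, 2, 2]),
   (4, [0, 1, 2, 1, 0]), (5, [2, 1, 0, 1, 2]), (6, [0, 0, 1, 2, 2]),
   (7, [2, 2, 1, 0, 0]), (8, [0, 1, 1, 1, 0]), (9, [2, 1, 1, 1, 2]),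
   (10, [1, 0, 0, 0, 1])]

-- line_symbols = [outcome[row][ri] for ri, row in enumerate(pattern)]
-- (pyGet? = none exactly where Python raises IndexError; Pre_ excludes those inputs,
--  the `getD ""` default is only reached outside Pre_)
def pvLineSyms (outcome : List (List String)) (pattern : List Int) : List String :=
  (PySem.List.enumerate pattern).map (fun p =>
    ((PySem.List.pyGet? outcome p.2).bind (fun r => PySem.List.pyGet? r p.1)).getD "")

-- `for s in line_symbols[1:]: if s == "W": wild_count += 1 else: break`
def pvWildLoopA : List String → Int → Int
  | [], acc => acc
  | s :: rest, acc => if s = "W" then pvWildLoopA rest (acc + 1) else acc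

-- the `if first_sym == "W": …` block producing (best_pay, best_symbol)
def pvWildBestA (syms : List String) : Int × Option String :=
  if syms.headD "" = "W" then
    let wc := pvWildLoopA (syms.drop 1) 1
    if 3 ≤ wc ∧ (pvPay? "W" wc).isSome then ((pvPay? "W" wc).getD 0, some "W")
    else (0, none)
  else (0, none)

-- `for sym in line_symbols: …` building (base_symbol, count)
def pvBaseLoopA : List String → Option String → Int → Option String × Int
  | [], b, c => (b, c)
  | s :: rest, b, c =>
    if s = "-" ∨ s = "⭐" then (b, c)
    else if s = "W" ∧ b = none then pvBaseLoopA rest b c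
    else
      match b with
      | none => pvBaseLoopA rest (some s) 1
      | some bs => if s = bs ∨ s = "W" then pvBaseLoopA rest (some bs) (c + 1) else (some bs, c)

-- the leading_wilds loop
def pvLeadWildsA : List String → Int → Int
  | [], acc => acc
  | s :: rest, acc =>
    if s = "W" then pvLeadWildsA rest (acc + 1)
    else if s = "-" ∨ s = "⭐" then 0
    else acc

-- the `if base_symbol:` block (Python truthiness: the empty string is falsy, like None)
def pvBaseBestA (syms : List String) (wb : Int × Option String) : Int × Option String × Int :=
  let bc := pvBaseLoopA syms none 0
  match bc.1 with
  | none => (wb.1, wb.2, bc.2)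
  | some bs =>
    if bs = "" then (wb.1, wb.2, bc.2)
    else
      let c := bc.2 + pvLeadWildsA syms 0
      if 3 ≤ c ∧ (pvPay? bs c).isSome then
        if wb.1 < (pvPay? bs c).getD 0 then ((pvPay? bs c).getD 0, some bs, c)
        else (wb.1, wb.2, c)
      else (wb.1, wb.2, c)

-- one loop body: `none` = nothing appended (starburst skip or best_pay == 0)
def pvScoreA (syms : List String) : Option (String × Int × Int) :=
  if syms.headD "" = "-" ∨ syms.headD "" = "⭐" then none
  else
    let res := pvBaseBestA syms (pvWildBestA syms)
    if 0 < res.1 then some (res.2.1.getD "", res.2.2, res.1) else none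

def evaluate_lines (outcome : List (List String)) : Int × (List (Int × String × Int × Int)) :=
  pvEnumPaylines.foldl
    (fun st p =>
      match pvScoreA (pvLineSyms outcome p.2) with
      | none => st
      | some r => (st.1 + r.2.2, st.2 ++ [(p.1, r.1, r.2.1, r.2.2)]))
    (0, [])

-- ===== PORT B =====

-- `while i < n and syms[i] == "W": i += 1` — the leading wild run
def pvWildRunB : List String → Nat
  | [] => 0
  | s :: rest => if s = "W" then pvWildRunB rest + 1 else 0

-- `while i < n and (syms[i] == base or syms[i] == "W"): count += 1; i += 1`
def pvBaseRunB (base : String) : List String → Int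
  | [] => 0
  | s :: rest => if s = base ∨ s = "W" then pvBaseRunB base rest + 1 else 0

-- base symbol and its run count, read at position wild_run of the same pass
def pvBaseScanB (syms : List String) : Option String × Int :=
  match syms.drop (pvWildRunB syms) with
  | [] => (none, 0)
  | s :: tl => if s = "-" ∨ s = "⭐" then (none, 0) else (some s, 1 + pvBaseRunB s tl)

-- `if wild_run >= 3: best_pay, best_sym = paytable["W"][wild_run], "W"`
def pvWildBestB (w : Int) : Int × Option String :=
  if 3 ≤ w then ((pvPay? "W" w).getD 0, some "W") else (0, none)

-- `if base: count += wild_run; pay = … if count >= 3 else 0; if pay > best_pay: …`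
def pvBaseBestB (bc : Option String × Int) (w : Int) (ws : Int × Option String) :
    Int × Option String × Int :=
  match bc.1 with
  | none => (ws.1, ws.2, bc.2)
  | some b =>
    if b = "" then (ws.1, ws.2, bc.2)
    else
      let c := bc.2 + w
      let pay := if 3 ≤ c then (pvPay? b c).getD 0 else 0
      if ws.1 < pay then (pay, some b, c) else (ws.1, ws.2, c)

def pvScoreB (syms : List String) : Option (String × Int × Int) :=
  if syms.headD "" = "-" ∨ syms.headD "" = "⭐" then none
  else
    let w : Int := (pvWildRunB syms : Int)
    let fin := pvBaseBestB (pvBaseScanB syms) w (pvWildBestB w)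
    if 0 < fin.1 then some (fin.2.1.getD "", fin.2.2, fin.1) else none

def evaluate_lines_alt (outcome : List (List String)) : Int × (List (Int × String × Int × Int)) :=
  pvEnumPaylines.foldl
    (fun st p =>
      match pvScoreB (pvLineSyms outcome p.2) with
      | none => st
      | some r => (st.1 + r.2.2, st.2 ++ [(p.1, r.1, r.2.1, r.2.2)]))
    (0, [])

-- ===== PRECONDITION & SPEC =====

-- exactly where Python A returns: the paylines index rows 0..2 at columns 0..4,
-- so A raises IndexError iff outcome has fewer than 3 rows or one of its first
-- three rows has fewer than 5 entries
def Pre_evaluate_lines (outcome : List (List String)) : Prop :=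
  3 ≤ outcome.length ∧ ∀ row ∈ outcome.take 3, 5 ≤ row.length
instance (outcome : List (List String)) : Decidable (Pre_evaluate_lines outcome) := by
  unfold Pre_evaluate_lines; infer_instance

def pvWitness_evaluate_lines : List (List String) :=
  [["A", "A", "A", "A", "A"], ["J", "Q", "K", "7", "BAR"], ["W", "W", "-", "J", "Q"]]

def Spec_evaluate_lines (outcome : List (List String)) (out : Int × (List (Int × String × Int × Int))) : Prop := out = evaluate_lines_alt outcome
instance (outcome : List (List String)) (out : Int × (List (Int × String × Int × Int))) : Decidable (Spec_evaluate_lines outcome out) := by unfold Spec_evaluate_lines; infer_instance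

-- ===== CLAIM (what is proved, stated in full; the proofs are below) =====
def Claim_equal_evaluate_lines : Prop := ∀ (outcome : List (List String)), Dom_evaluate_lines outcome → Pre_evaluate_lines outcome → Spec_evaluate_lines outcome (evaluate_lines outcome)

-- ===== LEMMAS AND PROOFS =====

lemma pvWildLoopA_eq (l : List String) (acc : Int) :
    pvWildLoopA l acc = acc + (pvWildRunB l : Int) := by
  induction l generalizing acc with
  | nil => simp [pvWildLoopA, pvWildRunB]
  | cons s rest ih =>
    by_cases hs : s = "W" <;> simp [pvWildLoopA, pvWildRunB, hs, ih] <;> push_cast <;> ring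

lemma pvWildRunB_le_length (l : List String) : pvWildRunB l ≤ l.length := by
  induction l with
  | nil => simp [pvWildRunB]
  | cons s rest ih => by_cases hs : s = "W" <;> simp [pvWildRunB, hs] <;> omega

lemma pvBaseLoopA_some (l : List String) (b : String) (c : Int)
    (hb1 : b ≠ "-") (hb2 : b ≠ "⭐") :
    pvBaseLoopA l (some b) c = (some b, c + pvBaseRunB b l) := by
  induction l generalizing c with
  | nil => simp [pvBaseLoopA, pvBaseRunB]
  | cons s rest ih =>
    by_cases hm : s = b ∨ s = "W"
    · have hs1 : s ≠ "-" := by rcases hm with h | h <;> subst h <;> simp_all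
      have hs2 : s ≠ "⭐" := by rcases hm with h | h <;> subst h <;> simp_all
      simp only [pvBaseLoopA, pvBaseRunB]
      rw [if_neg (by simp [hs1, hs2]), if_neg (by simp), if_pos hm, ih, if_pos hm]
      simp only [Prod.mk.injEq, true_and]
      ring
    · push_neg at hm
      by_cases hs1 : s = "-" ∨ s = "⭐" <;>
        simp [pvBaseLoopA, pvBaseRunB, hs1, hm.1, hm.2]

lemma pvBaseLoopA_none (l : List String) :
    pvBaseLoopA l none 0 = pvBaseScanB l := by
  induction l with
  | nil => simp [pvBaseLoopA, pvBaseScanB, pvWildRunB]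
  | cons s rest ih =>
    by_cases hsw : s = "W"
    · subst hsw
      have : pvBaseLoopA ("W" :: rest) none 0 = pvBaseLoopA rest none 0 := by
        simp [pvBaseLoopA]
      rw [this, ih]
      simp [pvBaseScanB, pvWildRunB]
    · by_cases hsk : s = "-" ∨ s = "⭐"
      · simp [pvBaseLoopA, pvBaseScanB, pvWildRunB, hsw, hsk]
      · push_neg at hsk
        have h1 : pvBaseLoopA (s :: rest) none 0 = pvBaseLoopA rest (some s) 1 := by
          simp [pvBaseLoopA, hsk.1, hsk.2, hsw]
        rw [h1, pvBaseLoopA_some rest s 1 hsk.1 hsk.2]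
        simp [pvBaseScanB, pvWildRunB, hsw, hsk.1, hsk.2]

lemma pvLeadWildsA_eq (l : List String) (acc : Int)
    (h : ∀ s ∈ (l.drop (pvWildRunB l)).head?, s ≠ "-" ∧ s ≠ "⭐") :
    pvLeadWildsA l acc = acc + (pvWildRunB l : Int) := by
  induction l generalizing acc with
  | nil => simp [pvLeadWildsA, pvWildRunB]
  | cons s rest ih =>
    by_cases hsw : s = "W"
    · subst hsw
      have hr : pvWildRunB ("W" :: rest) = pvWildRunB rest + 1 := by simp [pvWildRunB]
      have h' : ∀ t ∈ (rest.drop (pvWildRunB rest)).head?, t ≠ "-" ∧ t ≠ "⭐" := by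
        intro t ht; apply h; rw [hr]; simpa using ht
      simp only [pvLeadWildsA, ih (acc + 1) h', hr]
      push_cast; ring
    · have hr : pvWildRunB (s :: rest) = 0 := by simp [pvWildRunB, hsw]
      have hs := h s (by simp [hr])
      simp [pvLeadWildsA, hsw, hs.1, hs.2, hr]

lemma pvPay?_getD_nonneg (sym : String) (n : Int) : 0 ≤ (pvPay? sym n).getD 0 := by
  unfold pvPay?
  split_ifs <;> simp only [List.lookup] <;> (repeat' split) <;> simp

lemma pvWildBestA_eq (syms : List String) (h5 : syms.length ≤ 5) :
    pvWildBestA syms = pvWildBestB (pvWildRunB syms) := by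
  unfold pvWildBestA pvWildBestB
  by_cases hw : syms.headD "" = "W"
  · cases syms with
    | nil => simp at hw
    | cons s rest =>
      simp only [List.headD_cons] at hw
      subst hw
      have hr : pvWildRunB ("W" :: rest) = pvWildRunB rest + 1 := by simp [pvWildRunB]
      have hwc : pvWildLoopA (("W" :: rest).drop 1) 1 = 1 + (pvWildRunB rest : Int) :=
        pvWildLoopA_eq rest 1
      have hle : pvWildRunB rest ≤ 4 := by
        have h := pvWildRunB_le_length rest
        simp only [List.length_cons] at h5
        omega
      simp only [List.headD_cons, hwc, hr]
      by_cases h3 : (3 : Int) ≤ 1 + (pvWildRunB rest : Int)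
      · have hval : pvWildRunB rest = 2 ∨ pvWildRunB rest = 3 ∨ pvWildRunB rest = 4 := by omega
        rcases hval with h | h | h <;> rw [h] <;> decide
      · have h3' : ¬ (3 : Int) ≤ ((pvWildRunB rest + 1 : Nat) : Int) := by push_cast at h3 ⊢; omega
        have hA : ¬ ((3 : Int) ≤ 1 + (pvWildRunB rest : Int) ∧
            (pvPay? "W" (1 + (pvWildRunB rest : Int))).isSome = true) := fun hc => h3 hc.1
        rw [if_neg hA, if_neg h3']
        simp
  · have h0 : pvWildRunB syms = 0 := by
      cases syms with
      | nil => simp [pvWildRunB]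
      | cons s rest => simp only [List.headD_cons] at hw; simp [pvWildRunB, hw]
    rw [if_neg hw, h0]
    norm_num

lemma pvBaseBestA_eq (syms : List String) (ws : Int × Option String) (hws : 0 ≤ ws.1) :
    pvBaseBestA syms ws = pvBaseBestB (pvBaseScanB syms) (pvWildRunB syms) ws := by
  unfold pvBaseBestA pvBaseBestB
  rw [pvBaseLoopA_none]
  cases hbc : pvBaseScanB syms with
  | mk b? c =>
    cases b? with
    | none => simp
    | some bs =>
      by_cases hbe : bs = ""
      · simp [hbe]
      · -- from the scan shape: the symbol after the wild run is bs and is not "-"/"⭐"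
        have hshape : (syms.drop (pvWildRunB syms)).head? = some bs ∧ bs ≠ "-" ∧ bs ≠ "⭐" := by
          unfold pvBaseScanB at hbc
          cases hd : syms.drop (pvWildRunB syms) with
          | nil => rw [hd] at hbc; simp at hbc
          | cons t tl =>
            rw [hd] at hbc
            have hbc' : (if t = "-" ∨ t = "⭐" then ((none : Option String), (0 : Int))
                else (some t, 1 + pvBaseRunB t tl)) = (some bs, c) := hbc
            by_cases ht : t = "-" ∨ t = "⭐"
            · rw [if_pos ht] at hbc'; simp at hbc'
            · rw [if_neg ht] at hbc'
              push_neg at ht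
              have hts : t = bs := by simpa using congrArg Prod.fst hbc'
              subst hts
              exact ⟨by simp, ht.1, ht.2⟩
        have hhead : ∀ s ∈ (syms.drop (pvWildRunB syms)).head?, s ≠ "-" ∧ s ≠ "⭐" := by
          intro s hs
          rw [hshape.1] at hs
          simp only [Option.mem_def, Option.some.injEq] at hs
          subst hs
          exact ⟨hshape.2.1, hshape.2.2⟩
        rw [pvLeadWildsA_eq syms 0 hhead]
        simp only [hbe, zero_add]
        by_cases h3 : (3 : Int) ≤ c + (pvWildRunB syms : Int)
        · cases hp : pvPay? bs (c + (pvWildRunB syms : Int)) with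
          | none =>
            have hnb : ¬ ws.1 < (0 : Int) := by omega
            simp [h3, hnb]
          | some v => simp [h3]
        · have hnb : ¬ ws.1 < (0 : Int) := by omega
          simp [h3, hnb]

lemma pvScore_eq (syms : List String) (h5 : syms.length ≤ 5) :
    pvScoreA syms = pvScoreB syms := by
  unfold pvScoreA pvScoreB
  by_cases hskip : syms.headD "" = "-" ∨ syms.headD "" = "⭐"
  · rw [if_pos hskip, if_pos hskip]
  · have hws : (0 : Int) ≤ (pvWildBestB (pvWildRunB syms)).1 := by
      unfold pvWildBestB
      split_ifs with h
      · exact pvPay?_getD_nonneg _ _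
      · simp
    rw [if_neg hskip, if_neg hskip, pvWildBestA_eq syms h5,
        pvBaseBestA_eq syms _ hws]

lemma pvLineSyms_length (outcome : List (List String)) (pattern : List Int) :
    (pvLineSyms outcome pattern).length = pattern.length := by
  simp [pvLineSyms, PySem.List.length_enumerate]

-- ===== VERDICT (by name: the statement is the Claim_ definition above) =====
theorem evaluate_lines_spec : Claim_equal_evaluate_lines := by
  intro outcome _hdom _hpre
  unfold Spec_evaluate_lines evaluate_lines evaluate_lines_alt
  apply PySem.List.foldl_congr_mem
  intro acc p hp
  have h5 : p.2.length = 5 := by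
    simp only [pvEnumPaylines, List.mem_cons, List.not_mem_nil, or_false] at hp
    rcases hp with rfl | rfl | rfl | rfl | rfl | rfl | rfl | rfl | rfl | rfl <;> rfl
  rw [pvScore_eq (pvLineSyms outcome p.2) (by rw [pvLineSyms_length, h5])]
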